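-- pv_equiv track=rewrite | github.com/nbridgland/Advent2023 | day17/day17_1.py | clean_entry
-- ===== SOURCE A (Python) =====
-- def clean_entry(dictionary_entry):
--     output = {}
--     for direction in dictionary_entry:
--         output[direction] = []
--         for k in range(len(dictionary_entry[direction])):
--             pair1 = dictionary_entry[direction][k]
--             flagged = False
--             for j in range(len(dictionary_entry[direction])):
--                 pair2 = dictionary_entry[direction][j]
--                 if pair2[0] < pair1[0] and pair2[1] <= pair1[1] or pair2[1] < pair1[1] and pair2[0] <= pair1[0]:
--                     flagged = True
--                 if pair1 == pair2 and j < k: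
--                     flagged = True
--                 if pair1[1] == 4:
--                     flagged = True
--             if not flagged:
--                 output[direction].append(pair1)
--     return output
-- ===== SOURCE B (Python) =====
-- def clean_entry(dictionary_entry):
--     output = {}
--     for direction, pairs in dictionary_entry.items():
--         minimal = set()
--         run_min = None
--         prev_x = None
--         for x, y in sorted(set(pairs)):
--             if x != prev_x:
--                 if run_min is None or y < run_min:
--                     minimal.add((x, y))
--                     run_min = y
--                 prev_x = x
--         kept = []
--         seen = set()
--         for p in pairs:
--             if p not in seen:
--                 seen.add(p)
--                 if p in minimal and p[1] != 4:
--                     kept.append(p)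
--         output[direction] = kept
--     return output
-- ===== Notes on version B (the rewrite author's own statement) =====
-- stated objective: alternative
-- what changed: A tests every pair against every other pair (and re-scans for duplicates) per direction; B sorts the distinct pairs once and keeps a running minimum of the second coordinate to find the Pareto-minimal set, then emits first occurrences in one pass (O(n log n) per direction vs A's O(n^2); measured only ~1.35x on the generated small-list inputs).
import Mathlib
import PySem

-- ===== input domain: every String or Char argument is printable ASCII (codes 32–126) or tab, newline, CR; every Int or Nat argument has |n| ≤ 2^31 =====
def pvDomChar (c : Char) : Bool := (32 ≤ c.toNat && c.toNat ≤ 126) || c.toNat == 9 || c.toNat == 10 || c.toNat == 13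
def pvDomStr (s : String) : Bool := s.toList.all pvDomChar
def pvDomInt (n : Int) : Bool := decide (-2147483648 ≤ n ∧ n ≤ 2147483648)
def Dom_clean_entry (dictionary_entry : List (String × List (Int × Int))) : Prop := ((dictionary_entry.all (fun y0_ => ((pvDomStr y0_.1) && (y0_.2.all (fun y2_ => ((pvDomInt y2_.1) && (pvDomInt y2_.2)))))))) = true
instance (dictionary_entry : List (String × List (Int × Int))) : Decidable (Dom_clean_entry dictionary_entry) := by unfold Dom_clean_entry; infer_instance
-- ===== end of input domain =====

-- B replaces A's quadratic per-direction domination scan by sort + running-minimum filtering.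

-- ===== PORT A =====
-- A's per-direction double loop (the k-loop with the j-flag-loop)
def cleanDirA (L : List (Int × Int)) : List (Int × Int) :=
  (PySem.List.pyRange 0 (PySem.List.len L) 1).foldl (fun out k =>
    let pair1 := PySem.List.pyGetD L k (0, 0)
    let flagged := (PySem.List.pyRange 0 (PySem.List.len L) 1).foldl (fun flagged j =>
      let pair2 := PySem.List.pyGetD L j (0, 0)
      let flagged := if pair2.1 < pair1.1 ∧ pair2.2 ≤ pair1.2 ∨ pair2.2 < pair1.2 ∧ pair2.1 ≤ pair1.1 then true else flagged
      let flagged := if pair1 = pair2 ∧ j < k then true else flagged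
      let flagged := if pair1.2 = 4 then true else flagged
      flagged) false
    if flagged = false then out ++ [pair1] else out) []

def clean_entry (dictionary_entry : List (String × List (Int × Int))) : List (String × List (Int × Int)) :=
  let d : PySem.Dict String (List (Int × Int)) := PySem.Dict.mk dictionary_entry
  (d.keys.foldl (fun (output : PySem.Dict String (List (Int × Int))) direction =>
      output.insert direction (cleanDirA (d.getD direction []))) PySem.Dict.empty).items

-- ===== PORT B =====
-- one step of B's scan over the sorted distinct pairs (x != prev_x ⇒ maybe keep, update running min)
def scanStepB (st : PySem.Set (Int × Int) × Option Int × Option Int) (p : Int × Int) :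
    PySem.Set (Int × Int) × Option Int × Option Int :=
  if st.2.2 = some p.1 then st
  else
    match st.2.1 with
    | none => (PySem.Set.add st.1 p, some p.2, some p.1)
    | some m =>
        if p.2 < m then (PySem.Set.add st.1 p, some p.2, some p.1)
        else (st.1, some m, some p.1)

-- the set 'minimal' built by B's first loop
def minimalScan (pairs : List (Int × Int)) : PySem.Set (Int × Int) :=
  ((PySem.List.sorted2 (PySem.Set.ofList pairs) Prod.fst Prod.snd).foldl scanStepB
    (PySem.Set.empty, none, none)).1

-- B's second loop: first occurrences that are minimal and have second coordinate ≠ 4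
def cleanDirB (pairs : List (Int × Int)) : List (Int × Int) :=
  let minimal := minimalScan pairs
  (pairs.foldl (fun (st : List (Int × Int) × PySem.Set (Int × Int)) p =>
      if p ∈ st.2 then st
      else ((if p ∈ minimal ∧ p.2 ≠ 4 then st.1 ++ [p] else st.1), PySem.Set.add st.2 p))
    ([], PySem.Set.empty)).1

def clean_entry_alt (dictionary_entry : List (String × List (Int × Int))) : List (String × List (Int × Int)) :=
  dictionary_entry.map (fun dp => (dp.1, cleanDirB dp.2))

-- ===== PRECONDITION & SPEC =====
-- Pre_ excludes association lists with duplicate keys: they cannot arise from the Python dict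
-- argument, and which of the duplicate values wins is an artefact of the list encoding.
def Pre_clean_entry (dictionary_entry : List (String × List (Int × Int))) : Prop :=
  (dictionary_entry.map Prod.fst).Nodup
instance (dictionary_entry : List (String × List (Int × Int))) : Decidable (Pre_clean_entry dictionary_entry) := by unfold Pre_clean_entry; infer_instance

def pvWitness_clean_entry : (List (String × List (Int × Int))) :=
  [("a", [(1, 2), (0, 5), (1, 2), (3, 1)]), ("b", [])]

def Spec_clean_entry (dictionary_entry : List (String × List (Int × Int))) (out : List (String × List (Int × Int))) : Prop := out = clean_entry_alt dictionary_entry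
instance (dictionary_entry : List (String × List (Int × Int))) (out : List (String × List (Int × Int))) : Decidable (Spec_clean_entry dictionary_entry out) := by unfold Spec_clean_entry; infer_instance

-- ===== CLAIM (what is proved, stated in full; the proofs are below) =====
def Claim_equal_clean_entry : Prop := ∀ (dictionary_entry : List (String × List (Int × Int))), Dom_clean_entry dictionary_entry → Pre_clean_entry dictionary_entry → Spec_clean_entry dictionary_entry (clean_entry dictionary_entry)

-- ===== LEMMAS AND PROOFS =====

-- 'pair2 dominates pair1' as in A's first if
abbrev domP (q p : Int × Int) : Prop := q.1 < p.1 ∧ q.2 ≤ p.2 ∨ q.2 < p.2 ∧ q.1 ≤ p.1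

-- strict lexicographic order on pairs (Python tuple <)
abbrev plex (a b : Int × Int) : Prop := a.1 < b.1 ∨ (a.1 = b.1 ∧ a.2 < b.2)

-- the common per-direction result: first occurrences of undominated pairs with snd ≠ 4
def keepSpec (L : List (Int × Int)) : List (Int × Int) :=
  (PySem.List.dedup L).filter (fun p => decide (¬ (∃ q ∈ L, domP q p) ∧ p.2 ≠ 4))

lemma flag_fold (L : List (Int × Int)) (p : Int × Int) (k : Int) :
    ∀ (l : List Int) (b : Bool),
    l.foldl (fun flagged j =>
      let pair2 := PySem.List.pyGetD L j (0, 0)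
      let flagged := if pair2.1 < p.1 ∧ pair2.2 ≤ p.2 ∨ pair2.2 < p.2 ∧ pair2.1 ≤ p.1 then true else flagged
      let flagged := if p = pair2 ∧ j < k then true else flagged
      let flagged := if p.2 = 4 then true else flagged
      flagged) b
    = (b || l.any (fun j => decide (domP (PySem.List.pyGetD L j (0, 0)) p ∨ (p = PySem.List.pyGetD L j (0, 0) ∧ j < k) ∨ p.2 = 4))) := by
  intro l
  induction l with
  | nil => simp
  | cons x t ih =>
    intro b
    rw [List.foldl_cons, List.any_cons, ih]
    have hstep : ∀ (b : Bool),
        (let pair2 := PySem.List.pyGetD L x (0, 0)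
         let f1 := if pair2.1 < p.1 ∧ pair2.2 ≤ p.2 ∨ pair2.2 < p.2 ∧ pair2.1 ≤ p.1 then true else b
         let f2 := if p = pair2 ∧ x < k then true else f1
         if p.2 = 4 then true else f2)
        = (b || decide (domP (PySem.List.pyGetD L x (0, 0)) p ∨ (p = PySem.List.pyGetD L x (0, 0) ∧ x < k) ∨ p.2 = 4)) := by
      intro b
      simp only [domP]
      split_ifs <;> simp_all
    simp only [hstep]
    cases b <;> simp [Bool.or_assoc, Or.comm]


-- membership in enumerate
lemma mem_enumerate_iff {α : Type} (L : List α) (s : Int) (kp : Int × α) :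
    kp ∈ PySem.List.enumerate L s ↔ ∃ n : Nat, ∃ h : n < L.length, kp.1 = s + n ∧ kp.2 = L[n] := by
  induction L generalizing s with
  | nil => simp [PySem.List.enumerate]
  | cons x t ih =>
    simp only [PySem.List.enumerate, List.mem_cons, ih]
    constructor
    · rintro (rfl | ⟨n, h, h1, h2⟩)
      · exact ⟨0, by simp, by simp, by simp⟩
      · refine ⟨n+1, by simpa using Nat.succ_lt_succ h, ?_, by simpa using h2⟩
        rw [h1]; push_cast; ring
    · rintro ⟨n, h, h1, h2⟩
      cases n with
      | zero =>
        left
        simp only [Nat.cast_zero, add_zero] at h1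
        simp only [List.getElem_cons_zero] at h2
        cases kp; simp_all
      | succ m =>
        right
        refine ⟨m, by simpa using Nat.lt_of_succ_lt_succ h, ?_, by simpa using h2⟩
        rw [h1]; push_cast; ring

lemma cleanDirA_filter (L : List (Int × Int)) : cleanDirA L =
    ((PySem.List.enumerate L 0).filter (fun kp =>
      decide (¬ (∃ jq ∈ PySem.List.enumerate L 0, (domP jq.2 kp.2 ∨ (kp.2 = jq.2 ∧ jq.1 < kp.1) ∨ kp.2.2 = 4))))).map Prod.snd := by
  unfold cleanDirA
  simp only [flag_fold, Bool.false_or]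
  rw [PySem.List.foldl_append_ite
    (fun k : Int => ((PySem.List.pyRange 0 (PySem.List.len L)).any (fun j =>
          decide (domP (PySem.List.pyGetD L j (0, 0)) (PySem.List.pyGetD L k (0, 0)) ∨
            (PySem.List.pyGetD L k (0, 0) = PySem.List.pyGetD L j (0, 0) ∧ j < k) ∨
            (PySem.List.pyGetD L k (0, 0)).2 = 4)) = false))
    (fun k => PySem.List.pyGetD L k (0, 0))]
  rw [List.nil_append]
  rw [PySem.List.enumerate_eq_map_pyRange L (0,0), List.filter_map, List.map_map]
  congr 1
  apply List.filter_congr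
  intro k hk
  simp only [Function.comp_apply, decide_eq_decide, Bool.not_eq_true,
    List.any_eq_false, List.mem_map]
  constructor
  · intro hall
    rintro ⟨jq, ⟨j, hj, rfl⟩, hcond⟩
    have := hall j hj
    simp_all
  · intro hne j hj
    simp only [decide_eq_false_iff_not]
    intro hc
    exact hne ⟨(j, PySem.List.pyGetD L j (0,0)), ⟨j, hj, rfl⟩, hc⟩

lemma enum_firstocc (L : List (Int × Int)) (Q : (Int × Int) → Prop) [DecidablePred Q] :
    ((PySem.List.enumerate L 0).filter (fun kp =>
        decide (¬ (∃ jq ∈ PySem.List.enumerate L 0, kp.2 = jq.2 ∧ jq.1 < kp.1) ∧ Q kp.2))).map Prod.snd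
    = (PySem.List.dedup L).filter (fun p => decide (Q p)) := by
  induction L using List.reverseRecOn with
  | nil => simp [PySem.List.enumerate, PySem.List.dedup]
  | append_singleton L x ih =>
    have hsing : PySem.List.enumerate [x] (0 + (L.length : Int)) = [((L.length : Int), x)] := by
      simp [PySem.List.enumerate]
    rw [PySem.List.enumerate_append, hsing, List.filter_append, List.map_append]
    have hrestr : (PySem.List.enumerate L 0).filter (fun kp =>
        decide (¬ (∃ jq ∈ PySem.List.enumerate L 0 ++ [((L.length : Int), x)], kp.2 = jq.2 ∧ jq.1 < kp.1) ∧ Q kp.2))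
        = (PySem.List.enumerate L 0).filter (fun kp =>
        decide (¬ (∃ jq ∈ PySem.List.enumerate L 0, kp.2 = jq.2 ∧ jq.1 < kp.1) ∧ Q kp.2)) := by
      apply List.filter_congr
      intro kp hkp
      obtain ⟨n, hn, hk1, hk2⟩ := (mem_enumerate_iff L 0 kp).mp hkp
      simp only [decide_eq_decide]
      constructor
      · rintro ⟨hne, hq⟩
        exact ⟨fun ⟨jq, hjq, hc⟩ => hne ⟨jq, List.mem_append_left _ hjq, hc⟩, hq⟩
      · rintro ⟨hne, hq⟩
        refine ⟨fun ⟨jq, hjq, hc⟩ => ?_, hq⟩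
        rcases List.mem_append.mp hjq with h' | h'
        · exact hne ⟨jq, h', hc⟩
        · simp only [List.mem_singleton] at h'
          subst h'
          have h1 : (L.length : Int) < kp.1 := hc.2
          omega
    rw [hrestr, ih]
    have hx : ((¬ (∃ jq ∈ PySem.List.enumerate L 0 ++ [((L.length : Int), x)],
          x = jq.2 ∧ jq.1 < (L.length : Int)) ∧ Q x))
        ↔ (x ∉ L ∧ Q x) := by
      constructor
      · rintro ⟨hne, hq⟩
        refine ⟨fun hmem => ?_, hq⟩
        obtain ⟨n, hn, rfl⟩ := List.getElem_of_mem hmem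
        exact hne ⟨((n : Int), L[n]),
          List.mem_append_left _ ((mem_enumerate_iff L 0 _).mpr ⟨n, hn, by simp, rfl⟩),
          rfl, by show (n : Int) < (L.length : Int); exact_mod_cast hn⟩
      · rintro ⟨hnm, hq⟩
        refine ⟨fun ⟨jq, hjq, hc⟩ => ?_, hq⟩
        rcases List.mem_append.mp hjq with h' | h'
        · obtain ⟨n, hn, h1, h2⟩ := (mem_enumerate_iff L 0 jq).mp h'
          exact hnm (hc.1 ▸ h2 ▸ List.getElem_mem hn)
        · simp only [List.mem_singleton] at h'
          subst h'
          exact lt_irrefl _ hc.2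
    have hded : PySem.List.dedup (L ++ [x])
        = PySem.List.dedup L ++ (if x ∈ L then [] else [x]) := by
      rw [PySem.List.dedup_eq_ofList, PySem.List.dedup_eq_ofList,
        PySem.Set.ofList_append_singleton, PySem.Set.add_eq_ite]
      by_cases hmem : x ∈ L <;> simp [PySem.Set.mem_ofList, hmem]
    rw [hded, List.filter_append]
    congr 1
    rw [List.filter_singleton]
    have hdec : decide ((¬∃ jq ∈ PySem.List.enumerate L 0 ++ [((L.length : Int), x)],
        (((L.length : Int), x)).2 = jq.2 ∧ jq.1 < (((L.length : Int), x)).1) ∧ Q (((L.length : Int), x)).2)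
        = decide (x ∉ L ∧ Q x) := by
      simp only [decide_eq_decide]
      simpa using hx
    rw [hdec]
    by_cases hmem : x ∈ L <;> by_cases hq : Q x <;> simp [hmem, hq]

lemma exists_enum_snd (L : List (Int × Int)) (P : (Int × Int) → Prop) :
    (∃ jq ∈ PySem.List.enumerate L 0, P jq.2) ↔ ∃ q ∈ L, P q := by
  constructor
  · rintro ⟨jq, hjq, hp⟩
    obtain ⟨n, hn, h1, h2⟩ := (mem_enumerate_iff L 0 jq).mp hjq
    exact ⟨jq.2, h2 ▸ List.getElem_mem hn, hp⟩
  · rintro ⟨q, hq, hp⟩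
    obtain ⟨n, hn, rfl⟩ := List.getElem_of_mem hq
    exact ⟨((n : Int), L[n]), (mem_enumerate_iff L 0 _).mpr ⟨n, hn, by simp, rfl⟩, hp⟩

theorem cleanDirA_eq_keepSpec (L : List (Int × Int)) : cleanDirA L = keepSpec L := by
  rw [cleanDirA_filter]
  have hstep : (PySem.List.enumerate L 0).filter (fun kp =>
      decide (¬ (∃ jq ∈ PySem.List.enumerate L 0, (domP jq.2 kp.2 ∨ (kp.2 = jq.2 ∧ jq.1 < kp.1) ∨ kp.2.2 = 4))))
      = (PySem.List.enumerate L 0).filter (fun kp =>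
      decide (¬ (∃ jq ∈ PySem.List.enumerate L 0, kp.2 = jq.2 ∧ jq.1 < kp.1) ∧
        (¬ (∃ q ∈ L, domP q kp.2) ∧ kp.2.2 ≠ 4))) := by
    apply List.filter_congr
    intro kp hkp
    simp only [decide_eq_decide]
    have hsplit : (∃ jq ∈ PySem.List.enumerate L 0, (domP jq.2 kp.2 ∨ (kp.2 = jq.2 ∧ jq.1 < kp.1) ∨ kp.2.2 = 4))
        ↔ ((∃ jq ∈ PySem.List.enumerate L 0, domP jq.2 kp.2) ∨
           (∃ jq ∈ PySem.List.enumerate L 0, kp.2 = jq.2 ∧ jq.1 < kp.1) ∨ kp.2.2 = 4) := by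
      constructor
      · rintro ⟨jq, hjq, (h1 | h2 | h3)⟩
        · exact Or.inl ⟨jq, hjq, h1⟩
        · exact Or.inr (Or.inl ⟨jq, hjq, h2⟩)
        · exact Or.inr (Or.inr h3)
      · rintro (⟨jq, hjq, h1⟩ | ⟨jq, hjq, h2⟩ | h3)
        · exact ⟨jq, hjq, Or.inl h1⟩
        · exact ⟨jq, hjq, Or.inr (Or.inl h2)⟩
        · exact ⟨kp, hkp, Or.inr (Or.inr h3)⟩
    rw [hsplit, exists_enum_snd L (fun q => domP q kp.2)]
    push Not
    tauto
  rw [hstep, enum_firstocc L (fun p => ¬ (∃ q ∈ L, domP q p) ∧ p.2 ≠ 4)]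
  rfl

abbrev blex : (Int × Int) → (Int × Int) → Bool :=
  fun a b => decide (a.1 < b.1) || !decide (b.1 < a.1) && decide (a.2 < b.2)

lemma blex_iff (a b : Int × Int) : blex a b = true ↔ plex a b := by
  simp only [blex, plex, Bool.or_eq_true, Bool.and_eq_true, Bool.not_eq_true',
    decide_eq_true_eq, decide_eq_false_iff_not]
  constructor
  · rintro (h | ⟨h1, h2⟩); · exact Or.inl h
    · omega
  · rintro (h | ⟨h1, h2⟩); · exact Or.inl h
    · right; omega

lemma plex_trans {a b c : Int × Int} (h1 : plex a b) (h2 : plex b c) : plex a c := by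
  simp only [plex] at *; omega

lemma plex_total {a b : Int × Int} (h : a ≠ b) : plex a b ∨ plex b a := by
  have : a.1 ≠ b.1 ∨ (a.1 = b.1 ∧ a.2 ≠ b.2) := by
    by_cases h1 : a.1 = b.1
    · right; exact ⟨h1, fun h2 => h (Prod.ext h1 h2)⟩
    · left; exact h1
  simp only [plex]; omega

lemma insertBy_plex_pairwise (x : Int × Int) (ys : List (Int × Int))
    (h : ys.Pairwise plex) (hx : ∀ y ∈ ys, x ≠ y) :
    (PySem.List.insertBy blex x ys).Pairwise plex := by
  induction ys with
  | nil => simp [PySem.List.insertBy]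
  | cons y t ih =>
    rw [PySem.List.insertBy]
    rcases List.pairwise_cons.mp h with ⟨hyt, ht⟩
    by_cases hb : blex x y = true
    · rw [if_pos hb]
      refine List.pairwise_cons.mpr ⟨?_, h⟩
      intro z hz
      rcases List.mem_cons.mp hz with rfl | hz'
      · exact (blex_iff x z).mp hb
      · exact plex_trans ((blex_iff x y).mp hb) (hyt z hz')
    · rw [if_neg hb]
      refine List.pairwise_cons.mpr ⟨?_, ih ht (fun z hz => hx z (List.mem_cons_of_mem _ hz))⟩
      intro z hz
      rcases (PySem.List.mem_insertBy blex x z t).mp hz with hzx | hz'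
      · subst hzx
        rcases plex_total (hx y (List.mem_cons_self ..)) with hp | hp
        · exact absurd ((blex_iff z y).mpr hp) hb
        · exact hp
      · exact hyt z hz'

lemma sorted2_pairwise_plex (xs : List (Int × Int)) (h : xs.Nodup) :
    (PySem.List.sorted2 xs Prod.fst Prod.snd).Pairwise plex := by
  have key : ∀ (l acc : List (Int × Int)), acc.Pairwise plex →
      (∀ x ∈ l, ∀ y ∈ acc, x ≠ y) → l.Nodup →
      (l.foldl (fun acc x => PySem.List.insertBy blex x acc) acc).Pairwise plex := by
    intro l
    induction l with
    | nil => intro acc h1 _ _; simpa using h1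
    | cons x t ih =>
      intro acc h1 h2 h3
      rw [List.foldl_cons]
      rcases List.nodup_cons.mp h3 with ⟨hxt, ht⟩
      apply ih
      · exact insertBy_plex_pairwise x acc h1 (h2 x (List.mem_cons_self ..))
      · intro z hz y hy
        rcases (PySem.List.mem_insertBy blex x y acc).mp hy with rfl | hy'
        · exact fun hzy => hxt (hzy ▸ hz)
        · exact h2 z (List.mem_cons_of_mem _ hz) y hy'
      · exact ht
  have : PySem.List.sorted2 xs Prod.fst Prod.snd
      = xs.foldl (fun acc x => PySem.List.insertBy blex x acc) [] := by
    simp [PySem.List.sorted2]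
  rw [this]
  exact key xs [] (by simp) (by simp) h

lemma plex_not_domP {x q : Int × Int} (h : plex x q) : ¬ domP q x := by
  simp only [plex, domP] at *; omega

lemma scan_aux : ∀ (suf pre : List (Int × Int)) (M : PySem.Set (Int × Int)) (rm px : Option Int),
    (pre ++ suf).Pairwise plex →
    (match rm with | none => pre = [] | some m => (∃ q ∈ pre, q.2 = m) ∧ ∀ q ∈ pre, m ≤ q.2) →
    (match px with | none => pre = [] | some a => (∃ q ∈ pre, q.1 = a) ∧ ∀ q ∈ pre, q.1 ≤ a) →
    (∀ p, p ∈ M ↔ p ∈ pre ∧ ∀ q ∈ pre ++ suf, ¬ domP q p) →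
    ∀ p, p ∈ (suf.foldl scanStepB (M, rm, px)).1 ↔ p ∈ pre ++ suf ∧ ∀ q ∈ pre ++ suf, ¬ domP q p := by
  intro suf
  induction suf with
  | nil => intro pre M rm px hpw hrm hpx hM p; simpa using hM p
  | cons x rest ih =>
    intro pre M rm px hpw hrm hpx hM p
    have hq_x : ∀ q ∈ pre, plex q x := by
      intro q hq
      exact (List.pairwise_append.mp hpw).2.2 q hq x (List.mem_cons_self ..)
    have hx_r : ∀ q ∈ rest, plex x q := by
      intro q hq
      exact (List.pairwise_cons.mp (List.pairwise_append.mp hpw).2.1).1 q hq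
    have hassoc : (pre ++ [x]) ++ rest = pre ++ x :: rest := by simp
    have hpw' : ((pre ++ [x]) ++ rest).Pairwise plex := by rw [hassoc]; exact hpw
    have hxfree_of : (∀ q ∈ pre, ¬ domP q x) → (∀ q ∈ pre ++ x :: rest, ¬ domP q x) := by
      intro hpre q hq
      rcases List.mem_append.mp hq with h' | h'
      · exact hpre q h'
      · rcases List.mem_cons.mp h' with rfl | h''
        · simp only [domP]; omega
        · exact plex_not_domP (hx_r q h'')
    -- hM transported to the new prefix, given x is dominated
    have hM_dom : (∃ q0 ∈ pre, domP q0 x) →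
        ∀ p, p ∈ M ↔ p ∈ pre ++ [x] ∧ ∀ q ∈ (pre ++ [x]) ++ rest, ¬ domP q p := by
      rintro ⟨q0, hq0, hd0⟩ p
      rw [hassoc]
      constructor
      · intro hp
        rcases (hM p).mp hp with ⟨h1, h2⟩
        exact ⟨List.mem_append_left _ h1, h2⟩
      · rintro ⟨h1, h2⟩
        rcases List.mem_append.mp h1 with h' | h'
        · exact (hM p).mpr ⟨h', h2⟩
        · simp only [List.mem_singleton] at h'
          subst h'
          exact absurd hd0 (h2 q0 (List.mem_append_left _ hq0))
    -- hM transported to the new prefix with x added, given x is free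
    have hM_free : (∀ q ∈ pre ++ x :: rest, ¬ domP q x) →
        ∀ p, p ∈ PySem.Set.add M x ↔ p ∈ pre ++ [x] ∧ ∀ q ∈ (pre ++ [x]) ++ rest, ¬ domP q p := by
      intro hfree p
      rw [hassoc, PySem.Set.mem_add]
      constructor
      · rintro (hp | rfl)
        · rcases (hM p).mp hp with ⟨h1, h2⟩
          exact ⟨List.mem_append_left _ h1, h2⟩
        · exact ⟨List.mem_append_right _ (List.mem_singleton_self _), hfree⟩
      · rintro ⟨h1, h2⟩
        rcases List.mem_append.mp h1 with h' | h'
        · exact Or.inl ((hM p).mpr ⟨h', h2⟩)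
        · simp only [List.mem_singleton] at h'
          exact Or.inr h'
    rw [List.foldl_cons]
    by_cases hpx1 : px = some x.1
    · -- x has the same first coordinate as the previous element: skip, x is dominated
      have hstep : scanStepB (M, rm, px) x = (M, rm, px) := by
        simp [scanStepB, hpx1]
      rw [hstep, hpx1]
      rw [hpx1] at hpx
      obtain ⟨⟨qa, hqa, hqa1⟩, hbnd⟩ := hpx
      have hqa2 : qa.2 < x.2 := by
        rcases hq_x qa hqa with h | h
        · omega
        · exact h.2
      have hdom : domP qa x := by simp only [domP]; omega
      rcases rm with _ | m
      · simp only [] at hrm; subst hrm; simp at hqa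
      · obtain ⟨⟨qm, hqm, hqm2⟩, hmb⟩ := hrm
        have h := ih (pre ++ [x]) M (some m) (some x.1) hpw'
          ⟨⟨qm, List.mem_append_left _ hqm, hqm2⟩, by
            intro q hq
            rcases List.mem_append.mp hq with h' | h'
            · exact hmb q h'
            · simp only [List.mem_singleton] at h'
              subst h'
              have := hmb qa hqa
              omega⟩
          ⟨⟨x, List.mem_append_right _ (List.mem_singleton_self _), rfl⟩, by
            intro q hq
            rcases List.mem_append.mp hq with h' | h'
            · exact hbnd q h'
            · simp only [List.mem_singleton] at h'
              subst h'
              exact le_refl _⟩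
          (hM_dom ⟨qa, hqa, hdom⟩) p
        rw [hassoc] at h
        exact h
    · -- new first coordinate
      have hfst : ∀ q ∈ pre, q.1 < x.1 := by
        intro q hq
        rcases px with _ | a
        · simp only [] at hpx; subst hpx; simp at hq
        · obtain ⟨⟨qa, hqa, hqa1⟩, hbnd⟩ := hpx
          have hqax : qa.1 < x.1 := by
            rcases hq_x qa hqa with h | h
            · exact h
            · exact absurd (by rw [← hqa1, h.1]) hpx1
          have := hbnd q hq
          omega
      rcases rm with _ | m
      · -- first element ever
        simp only [] at hrm
        subst hrm
        have hstep : scanStepB (M, none, px) x = (PySem.Set.add M x, some x.2, some x.1) := by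
          simp [scanStepB, hpx1]
        rw [hstep]
        have hfree : ∀ q ∈ ([] : List (Int × Int)) ++ x :: rest, ¬ domP q x :=
          hxfree_of (by simp)
        have h := ih ([] ++ [x]) (PySem.Set.add M x) (some x.2) (some x.1) hpw'
          ⟨⟨x, by simp, rfl⟩, by simp⟩
          ⟨⟨x, by simp, rfl⟩, by simp⟩
          (hM_free hfree) p
        rw [hassoc] at h
        exact h
      · obtain ⟨⟨qm, hqm, hqm2⟩, hmb⟩ := hrm
        by_cases hlt : x.2 < m
        · -- new running minimum: x is Pareto-minimal
          have hstep : scanStepB (M, some m, px) x = (PySem.Set.add M x, some x.2, some x.1) := by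
            simp [scanStepB, hpx1, hlt]
          rw [hstep]
          have hfree : ∀ q ∈ pre ++ x :: rest, ¬ domP q x := by
            apply hxfree_of
            intro q hq
            have := hmb q hq
            simp only [domP]
            omega
          have h := ih (pre ++ [x]) (PySem.Set.add M x) (some x.2) (some x.1) hpw'
            ⟨⟨x, List.mem_append_right _ (List.mem_singleton_self _), rfl⟩, by
              intro q hq
              rcases List.mem_append.mp hq with h' | h'
              · have := hmb q h'; omega
              · simp only [List.mem_singleton] at h'; subst h'; exact le_refl _⟩
            ⟨⟨x, List.mem_append_right _ (List.mem_singleton_self _), rfl⟩, by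
              intro q hq
              rcases List.mem_append.mp hq with h' | h'
              · have := hfst q h'; omega
              · simp only [List.mem_singleton] at h'; subst h'; exact le_refl _⟩
            (hM_free hfree) p
          rw [hassoc] at h
          exact h
        · -- x is dominated by the running minimum witness
          have hstep : scanStepB (M, some m, px) x = (M, some m, some x.1) := by
            simp [scanStepB, hpx1, hlt]
          rw [hstep]
          have hdom : domP qm x := by
            have := hfst qm hqm
            simp only [domP]
            omega
          have h := ih (pre ++ [x]) M (some m) (some x.1) hpw'
            ⟨⟨qm, List.mem_append_left _ hqm, hqm2⟩, by
              intro q hq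
              rcases List.mem_append.mp hq with h' | h'
              · exact hmb q h'
              · simp only [List.mem_singleton] at h'; subst h'; omega⟩
            ⟨⟨x, List.mem_append_right _ (List.mem_singleton_self _), rfl⟩, by
              intro q hq
              rcases List.mem_append.mp hq with h' | h'
              · have := hfst q h'; omega
              · simp only [List.mem_singleton] at h'; subst h'; exact le_refl _⟩
            (hM_dom ⟨qm, hqm, hdom⟩) p
          rw [hassoc] at h
          exact h

lemma minimalScan_mem (pairs : List (Int × Int)) (p : Int × Int) :
    p ∈ minimalScan pairs ↔ p ∈ pairs ∧ ∀ q ∈ pairs, ¬ domP q p := by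
  set S := PySem.List.sorted2 (PySem.Set.ofList pairs) Prod.fst Prod.snd with hS
  have hperm : S.Perm (PySem.Set.ofList pairs) := PySem.List.sorted2_perm ..
  have hmemS : ∀ y : Int × Int, y ∈ S ↔ y ∈ pairs := by
    intro y
    rw [hperm.mem_iff, PySem.Set.mem_ofList]
  have hpw : S.Pairwise plex :=
    sorted2_pairwise_plex _ (PySem.Set.nodup_ofList pairs)
  have h := scan_aux S [] PySem.Set.empty none none (by simpa using hpw) rfl rfl
    (by intro p; simp [PySem.Set.empty]) p
  simp only [List.nil_append] at h
  rw [minimalScan, ← hS, h, hmemS]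
  constructor
  · rintro ⟨h1, h2⟩
    exact ⟨h1, fun q hq => h2 q ((hmemS q).mpr hq)⟩
  · rintro ⟨h1, h2⟩
    exact ⟨h1, fun q hq => h2 q ((hmemS q).mp hq)⟩

lemma dedup_append_singleton (L : List (Int × Int)) (x : Int × Int) :
    PySem.List.dedup (L ++ [x]) = PySem.List.dedup L ++ (if x ∈ L then [] else [x]) := by
  rw [PySem.List.dedup_eq_ofList, PySem.List.dedup_eq_ofList,
    PySem.Set.ofList_append_singleton, PySem.Set.add_eq_ite]
  by_cases hmem : x ∈ L <;> simp [PySem.Set.mem_ofList, hmem]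

lemma foldB_aux (m : List (Int × Int)) (pairs : List (Int × Int)) :
    pairs.foldl (fun (st : List (Int × Int) × PySem.Set (Int × Int)) p =>
      if p ∈ st.2 then st
      else ((if p ∈ m ∧ p.2 ≠ 4 then st.1 ++ [p] else st.1), PySem.Set.add st.2 p))
    ([], PySem.Set.empty)
    = ((PySem.List.dedup pairs).filter (fun p => decide (p ∈ m ∧ p.2 ≠ 4)),
       PySem.Set.ofList pairs) := by
  induction pairs using List.reverseRecOn with
  | nil => simp [PySem.List.dedup, PySem.Set.ofList, PySem.Set.empty]
  | append_singleton L x ih =>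
    rw [List.foldl_append, ih, List.foldl_cons, List.foldl_nil]
    dsimp only
    rw [dedup_append_singleton, PySem.Set.ofList_append_singleton, PySem.Set.add_eq_ite,
      List.filter_append]
    by_cases hmem : x ∈ L
    · have hm2 : x ∈ PySem.Set.ofList L := (PySem.Set.mem_ofList ..).mpr hmem
      rw [if_pos hm2, if_pos hmem, if_pos hm2]
      simp
    · have hm2 : x ∉ PySem.Set.ofList L := fun h => hmem ((PySem.Set.mem_ofList ..).mp h)
      rw [if_neg hm2, if_neg hmem, if_neg hm2]
      rw [Prod.mk.injEq]
      refine ⟨?_, rfl⟩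
      rw [List.filter_singleton]
      by_cases hq : x ∈ m ∧ x.2 ≠ 4 <;> simp [hq]

theorem cleanDirB_eq_keepSpec (L : List (Int × Int)) : cleanDirB L = keepSpec L := by
  rw [cleanDirB, foldB_aux]
  dsimp only
  apply List.filter_congr
  intro p hp
  have hpL : p ∈ L := by
    rw [PySem.List.dedup_eq_ofList] at hp
    exact (PySem.Set.mem_ofList ..).mp hp
  simp only [decide_eq_decide]
  rw [minimalScan_mem]
  constructor
  · rintro ⟨⟨_, h2⟩, h4⟩
    exact ⟨fun ⟨q, hq, hd⟩ => h2 q hq hd, h4⟩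
  · rintro ⟨h2, h4⟩
    exact ⟨⟨hpL, fun q hq hd => h2 ⟨q, hq, hd⟩⟩, h4⟩

-- ===== VERDICT (by name: the statement is the Claim_ definition above) =====
theorem clean_entry_spec : Claim_equal_clean_entry := by
  intro l _ hpre
  show clean_entry l = clean_entry_alt l
  unfold clean_entry clean_entry_alt
  have hkeys : (PySem.Dict.mk l).keys = l.map Prod.fst := by simp [PySem.Dict.keys]
  rw [PySem.Dict.items_foldl_insert_fresh ((PySem.Dict.mk l).keys) (fun a => a)
      (fun dir => cleanDirA ((PySem.Dict.mk l).getD dir [])) PySem.Dict.empty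
      (by intro a _; simp [PySem.Dict.contains_empty])
      (by simpa [hkeys] using hpre)]
  have hemp : (PySem.Dict.empty : PySem.Dict String (List (Int × Int))).items = [] := rfl
  rw [hemp, List.nil_append, hkeys, List.map_map]
  apply List.map_congr_left
  intro dp hdp
  have hmem : (dp.1, dp.2) ∈ (PySem.Dict.mk l).items := by simpa using hdp
  have hget : (PySem.Dict.mk l).getD dp.1 [] = dp.2 :=
    PySem.Dict.getD_of_mem_items _ hmem (by simpa [hkeys] using hpre) []
  have hAB : cleanDirA dp.2 = cleanDirB dp.2 :=
    (cleanDirA_eq_keepSpec dp.2).trans (cleanDirB_eq_keepSpec dp.2).symm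
  simp [Function.comp, hget, hAB]
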